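-- pv_equiv track=rewrite | github.com/liziyong25/Quanteam | src/quant_eam/registry/experience_retrieval.py | _effective_status
-- ===== SOURCE A (Python) =====
-- from typing import Any
--
-- def _effective_status(card_base: dict[str, Any], events: list[dict[str, Any]]) -> str:
--     status = str(card_base.get("status") or "draft")
--     for ev in events:
--         if str(ev.get("event_type") or "") == "PROMOTED":
--             ns = str(ev.get("new_status") or "")
--             if ns:
--                 status = ns
--     return status or "draft"
-- ===== SOURCE B (Python) =====
-- def _effective_status(card_base: dict, events: list) -> str:
--     # Reverse scan: first PROMOTED event (from the end) with a non-empty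
--     # new_status wins; otherwise fall back to the card's own status.
--     for ev in reversed(events):
--         if str(ev.get("event_type") or "") == "PROMOTED":
--             ns = str(ev.get("new_status") or "")
--             if ns:
--                 return ns
--     return str(card_base.get("status") or "draft")
-- ===== Notes on version B (the rewrite author's own statement) =====
-- stated objective: alternative
-- what changed: Replaces the forward last-wins accumulator loop by a reverse scan that returns the first matching PROMOTED new_status immediately and drops the redundant trailing 'or draft' (the accumulator is never empty).
import Mathlib
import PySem

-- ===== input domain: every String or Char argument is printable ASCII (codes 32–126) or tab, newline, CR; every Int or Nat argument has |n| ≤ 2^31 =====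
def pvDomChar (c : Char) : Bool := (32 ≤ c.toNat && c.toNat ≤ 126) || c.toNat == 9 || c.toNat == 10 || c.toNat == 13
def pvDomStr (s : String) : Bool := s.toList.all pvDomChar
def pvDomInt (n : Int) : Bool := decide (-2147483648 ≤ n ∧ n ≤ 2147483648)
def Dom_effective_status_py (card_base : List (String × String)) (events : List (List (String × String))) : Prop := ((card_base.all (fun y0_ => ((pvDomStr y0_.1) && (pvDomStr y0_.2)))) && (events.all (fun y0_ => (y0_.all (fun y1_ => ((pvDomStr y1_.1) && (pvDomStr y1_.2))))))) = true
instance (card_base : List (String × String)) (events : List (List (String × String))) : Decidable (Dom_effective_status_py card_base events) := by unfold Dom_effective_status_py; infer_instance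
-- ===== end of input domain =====

-- B replaces A's forward last-wins accumulator loop by a reverse scan returning the
-- first matching PROMOTED new_status immediately (same O(n) cost, different decomposition).

-- dict.get(k) with first-match lookup, coerced through `or ""` (missing/None → "")
def pvGetS : List (String × String) → String → String
  | [], _ => ""
  | (k, v) :: rest, key => if k = key then v else pvGetS rest key

-- ===== PORT A =====
def effective_status_py (card_base : List (String × String)) (events : List (List (String × String))) : String :=
  -- status = str(card_base.get("status") or "draft")
  let status0 := let s := pvGetS card_base "status"; if s = "" then "draft" else s
  let status := events.foldl (fun st ev =>
    if pvGetS ev "event_type" = "PROMOTED" then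
      let ns := pvGetS ev "new_status"
      if ns ≠ "" then ns else st
    else st) status0
  -- return status or "draft"
  if status = "" then "draft" else status

-- ===== PORT B =====
-- reverse scan with early return: none = no PROMOTED event with non-empty new_status
def pvAltScan : List (List (String × String)) → Option String
  | [] => none
  | ev :: rest =>
    if pvGetS ev "event_type" = "PROMOTED" then
      let ns := pvGetS ev "new_status"
      if ns ≠ "" then some ns else pvAltScan rest
    else pvAltScan rest

def effective_status_py_alt (card_base : List (String × String)) (events : List (List (String × String))) : String :=
  match pvAltScan events.reverse with
  | some ns => ns
  | none => let s := pvGetS card_base "status"; if s = "" then "draft" else s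

-- ===== PRECONDITION & SPEC =====
def Spec_effective_status_py (card_base : List (String × String)) (events : List (List (String × String))) (out : String) : Prop := out = effective_status_py_alt card_base events
instance (card_base : List (String × String)) (events : List (List (String × String))) (out : String) : Decidable (Spec_effective_status_py card_base events out) := by unfold Spec_effective_status_py; infer_instance

-- ===== CLAIM (what is proved, stated in full; the proofs are below) =====
def Claim_equal_effective_status_py : Prop := ∀ (card_base : List (String × String)) (events : List (List (String × String))), Dom_effective_status_py card_base events → Spec_effective_status_py card_base events (effective_status_py card_base events)

-- ===== LEMMAS AND PROOFS =====

-- appending one event on the right of the scanned (reversed) list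
theorem pvAltScan_append (l : List (List (String × String))) (ev : List (String × String)) :
    pvAltScan (l ++ [ev]) =
      match pvAltScan l with
      | some ns => some ns
      | none =>
        if pvGetS ev "event_type" = "PROMOTED" then
          (let ns := pvGetS ev "new_status"; if ns ≠ "" then some ns else none)
        else none := by
  induction l with
  | nil => simp [pvAltScan]
  | cons e rest ih =>
      simp only [List.cons_append, pvAltScan]
      split_ifs with h1 h2 <;>
        first
          | rfl
          | (rw [ih]; cases hh : pvAltScan rest <;> simp_all)

-- A's fold equals B's reverse scan with the initial status as fallback
theorem fold_eq_scan (evs : List (List (String × String))) (st : String) :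
    evs.foldl (fun st ev =>
      if pvGetS ev "event_type" = "PROMOTED" then
        let ns := pvGetS ev "new_status"
        if ns ≠ "" then ns else st
      else st) st =
      match pvAltScan evs.reverse with
      | some ns => ns
      | none => st := by
  induction evs generalizing st with
  | nil => simp [pvAltScan]
  | cons ev rest ih =>
      simp only [List.foldl_cons, List.reverse_cons]
      rw [ih]
      rw [pvAltScan_append]
      cases h : pvAltScan rest.reverse <;> split_ifs <;> simp_all

-- ===== VERDICT (by name: the statement is the Claim_ definition above) =====
theorem effective_status_py_spec : Claim_equal_effective_status_py := by
  intro card_base events _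
  unfold Spec_effective_status_py
  simp only [effective_status_py, effective_status_py_alt]
  have h0 : (let s := pvGetS card_base "status"; if s = "" then "draft" else s) ≠ "" := by
    simp only []
    split_ifs with h <;> simp_all
  rw [fold_eq_scan]
  cases h : pvAltScan events.reverse with
  | some ns =>
      have hne : ns ≠ "" := by
        -- scan only returns non-empty strings
        clear h0
        generalize events.reverse = l at h
        induction l with
        | nil => simp [pvAltScan] at h
        | cons e rest ih =>
            simp only [pvAltScan] at h
            split_ifs at h with h1 h2
            · simp_all
            · exact ih h
            · exact ih h
      simp [hne]
  | none => split_ifs with h2 <;> simp_all
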